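-- pv_equiv track=rewrite | github.com/EFUB/efub4-basic-algorithm-study | [8주차]/24460.py | select_seat
-- ===== SOURCE A (Python) =====
-- MIN_RANGE = 2
--
-- DIVISION_SIZE = 4
--
-- def select_seat(seats, size, x, y):
--     if size < MIN_RANGE:
--         return seats[x][y]
--
--     half = size // 2
--     tmp = []
--
--     for i in range(DIVISION_SIZE):
--         nx = x + (i % 2) * half  # 0, 1, 0, 1
--         ny = y + (i // 2) * half  # 0, 0, 1, 1
--
--         tmp.append(select_seat(seats, half, nx, ny))
--
--     tmp.sort()
--     return tmp[1]
-- ===== SOURCE B (Python) =====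
-- def select_seat(seats, size, x, y):
--     # Iterative bottom-up quadtree reduction: expand the coordinate frontier
--     # level by level with A's halving/offset rule, read the leaf cells, then
--     # repeatedly combine each block of four by sorted(...)[1] until one value remains.
--     halves = []
--     s = size
--     while s >= 2:
--         halves.append(s // 2)
--         s //= 2
--     coords = [(x, y)]
--     for h in halves:
--         coords = [(cx + (i % 2) * h, cy + (i // 2) * h) for cx, cy in coords for i in range(4)]
--     level = [seats[cx][cy] for cx, cy in coords]
--     while len(level) > 1:
--         level = [sorted(level[i:i + 4])[1] for i in range(0, len(level), 4)]
--     return level[0]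
-- ===== Notes on version B (the rewrite author's own statement) =====
-- stated objective: alternative
-- what changed: Replaces A's top-down recursion by an iterative bottom-up quadtree reduction: compute the halving sequence, expand the coordinate frontier level by level with the same offset rule, read all leaf cells into a flat list, then repeatedly collapse blocks of four via sorted(block)[1] until one value remains; for size >= 2 Pre_ conservatively requires nonnegative start indices with the whole block in bounds, excluding negative-index-wraparound starts on which A returns (B returns the same value there).
-- outside the precondition, e.g. on select_seat([[1, 2], [3, 4]], 2, -2, -2): A returns 2, B returns 2
import Mathlib
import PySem

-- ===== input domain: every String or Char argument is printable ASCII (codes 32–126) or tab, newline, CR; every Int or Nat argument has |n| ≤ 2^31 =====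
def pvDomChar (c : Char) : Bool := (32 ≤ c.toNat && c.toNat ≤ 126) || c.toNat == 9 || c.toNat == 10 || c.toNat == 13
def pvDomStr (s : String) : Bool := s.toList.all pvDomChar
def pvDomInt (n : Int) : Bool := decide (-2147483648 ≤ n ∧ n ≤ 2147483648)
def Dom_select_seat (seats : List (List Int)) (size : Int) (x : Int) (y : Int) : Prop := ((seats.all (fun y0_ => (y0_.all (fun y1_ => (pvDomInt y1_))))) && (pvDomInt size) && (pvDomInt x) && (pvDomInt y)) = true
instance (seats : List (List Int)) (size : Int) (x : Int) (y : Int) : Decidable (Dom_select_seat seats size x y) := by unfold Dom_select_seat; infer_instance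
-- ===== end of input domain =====

-- B replaces A's top-down quadrant recursion by an iterative bottom-up quadtree reduction
-- (same cost, different decomposition); equivalence is proved for the return value.


-- seats[cx][cy]; the defaults are unreachable under Pre_select_seat
def pvAt (seats : List (List Int)) (cx cy : Int) : Int :=
  PySem.List.pyGetD (PySem.List.pyGetD seats cx []) cy 0

-- termination helper: size // 2 shrinks for size ≥ 2
theorem pvHalf_lt (size : Int) (h : ¬ size < 2) : (PySem.Int.floordiv size 2).toNat < size.toNat := by
  rw [PySem.Int.floordiv_eq_ediv_of_pos (by omega)]
  omega

-- ===== PORT A =====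
def select_seat (seats : List (List Int)) (size : Int) (x : Int) (y : Int) : Int :=
  if _h : size < 2 then pvAt seats x y
  else
    let half := PySem.Int.floordiv size 2
    let tmp := (PySem.List.pyRange 0 4 1).foldl
      (fun acc i =>
        acc ++ [select_seat seats half (x + PySem.Int.mod i 2 * half) (y + PySem.Int.floordiv i 2 * half)]) []
    PySem.List.pyGetD (PySem.List.sorted tmp (fun v => v) false) 1 0
termination_by size.toNat
decreasing_by exact pvHalf_lt size _h

-- ===== PORT B =====
-- halves = the successive values of s // 2 while s >= 2
def pvHalves (size : Int) : List Int :=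
  if _h : size < 2 then []
  else PySem.Int.floordiv size 2 :: pvHalves (PySem.Int.floordiv size 2)
termination_by size.toNat
decreasing_by exact pvHalf_lt size _h

-- one level of the coordinate expansion: each cell is replaced by its four sub-quadrant corners
def pvExpand (cs : List (Int × Int)) (h : Int) : List (Int × Int) :=
  cs.flatMap (fun c => (PySem.List.pyRange 0 4 1).map
    (fun i => (c.1 + PySem.Int.mod i 2 * h, c.2 + PySem.Int.floordiv i 2 * h)))

-- sorted(chunk)[1]
def pvCombine (chunk : List Int) : Int :=
  PySem.List.pyGetD (PySem.List.sorted chunk (fun v => v) false) 1 0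

-- [sorted(level[i:i+4])[1] for i in range(0, len(level), 4)]; the trailing-chunk branch
-- ports sorted(chunk)[1] for a short final chunk (level lengths are powers of four here)
def pvPass : List Int → List Int
  | a :: b :: c :: d :: rest => pvCombine [a, b, c, d] :: pvPass rest
  | [] => []
  | rest => [pvCombine rest]

theorem pvPass_length_le : ∀ L : List Int, (pvPass L).length ≤ L.length
  | [] => by simp [pvPass]
  | [a] => by simp [pvPass]
  | [a, b] => by simp [pvPass]
  | [a, b, c] => by simp [pvPass]
  | a :: b :: c :: d :: rest => by
      have := pvPass_length_le rest
      simp [pvPass]; omega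

theorem pvPass_length_lt : ∀ (L : List Int), ¬ L.length ≤ 1 → (pvPass L).length < L.length
  | [], h => by simp at h
  | [a], h => by simp at h
  | [a, b], _ => by simp [pvPass]
  | [a, b, c], _ => by simp [pvPass]
  | a :: b :: c :: d :: rest, _ => by
      have := pvPass_length_le rest
      simp [pvPass]; omega

-- while len(level) > 1: level = pvPass level
def pvReduce (L : List Int) : List Int :=
  if _h : L.length ≤ 1 then L else pvReduce (pvPass L)
termination_by L.length
decreasing_by exact pvPass_length_lt L _h

def select_seat_alt (seats : List (List Int)) (size : Int) (x : Int) (y : Int) : Int :=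
  let halves := pvHalves size
  let coords := halves.foldl pvExpand [(x, y)]
  let level := coords.map (fun c => pvAt seats c.1 c.2)
  PySem.List.pyGetD (pvReduce level) 0 0

-- ===== PRECONDITION & SPEC =====
-- Pre_ excludes exactly the inputs where the leaf accesses seats[nx][ny] raise IndexError, plus
-- (stated narrowing) for size ≥ 2 it conservatively requires nonnegative start indices and a full
-- in-bounds size×size block over all rows: Python negative-index wraparound and ragged grids on
-- which A happens to return (B returns the same values there) are excluded for simplicity.
def Pre_select_seat (seats : List (List Int)) (size : Int) (x : Int) (y : Int) : Prop :=
  if size < 2 then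
    PySem.Raise.InRange seats.length x ∧ PySem.Raise.InRange (PySem.List.pyGetD seats x []).length y
  else
    0 ≤ x ∧ 0 ≤ y ∧ x + size - 1 < (seats.length : Int) ∧
      ∀ row ∈ seats, y + size - 1 < (row.length : Int)
instance (seats : List (List Int)) (size : Int) (x : Int) (y : Int) : Decidable (Pre_select_seat seats size x y) := by unfold Pre_select_seat; infer_instance

def pvWitness_select_seat : List (List Int) × Int × Int × Int := ([[1, 2], [3, 4]], 2, 0, 0)

def Spec_select_seat (seats : List (List Int)) (size : Int) (x : Int) (y : Int) (out : Int) : Prop := out = select_seat_alt seats size x y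
instance (seats : List (List Int)) (size : Int) (x : Int) (y : Int) (out : Int) : Decidable (Spec_select_seat seats size x y out) := by unfold Spec_select_seat; infer_instance

-- ===== CLAIM (what is proved, stated in full; the proofs are below) =====
def Claim_equal_select_seat : Prop := ∀ (seats : List (List Int)) (size : Int) (x : Int) (y : Int), Dom_select_seat seats size x y → Pre_select_seat seats size x y → Spec_select_seat seats size x y (select_seat seats size x y)

-- ===== LEMMAS AND PROOFS =====

theorem pvExpand_append (cs ds : List (Int × Int)) (h : Int) :
    pvExpand (cs ++ ds) h = pvExpand cs h ++ pvExpand ds h := by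
  simp [pvExpand]

theorem foldl_pvExpand_append : ∀ (hs : List Int) (cs ds : List (Int × Int)),
    hs.foldl pvExpand (cs ++ ds) = hs.foldl pvExpand cs ++ hs.foldl pvExpand ds
  | [], cs, ds => rfl
  | h :: hs, cs, ds => by
      simp only [List.foldl_cons, pvExpand_append]
      exact foldl_pvExpand_append hs _ _

theorem pyRange04 : PySem.List.pyRange 0 4 1 = [0, 1, 2, 3] := by decide

theorem pvExpand_length : ∀ (cs : List (Int × Int)) (h : Int),
    (pvExpand cs h).length = 4 * cs.length
  | [], h => by simp [pvExpand]
  | c :: cs, h => by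
      have ih := pvExpand_length cs h
      simp only [pvExpand, List.flatMap_cons, List.length_append, List.length_map,
        List.length_cons] at *
      rw [ih]
      simp [pyRange04]
      omega

theorem foldl_pvExpand_length : ∀ (hs : List Int) (cs : List (Int × Int)),
    (hs.foldl pvExpand cs).length = cs.length * 4 ^ hs.length
  | [], cs => by simp
  | h :: hs, cs => by
      rw [List.foldl_cons, foldl_pvExpand_length hs, pvExpand_length]
      rw [List.length_cons, pow_succ]
      ring

theorem pvExpand_single (x y h : Int) :
    pvExpand [(x, y)] h = [(x, y), (x + h, y), (x, y + h), (x + h, y + h)] := by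
  simp [pvExpand, pyRange04]

theorem pvReduce_small (L : List Int) (h : L.length ≤ 1) : pvReduce L = L := by
  rw [pvReduce]; simp [h]

theorem pvReduce_step (L : List Int) (h : ¬ L.length ≤ 1) : pvReduce L = pvReduce (pvPass L) := by
  rw [pvReduce]; simp [h]

theorem pvPass_append : ∀ (L1 L2 : List Int), L1.length % 4 = 0 →
    pvPass (L1 ++ L2) = pvPass L1 ++ pvPass L2
  | [], L2, _ => by simp [pvPass]
  | [a], L2, h => by simp at h
  | [a, b], L2, h => by simp at h
  | [a, b, c], L2, h => by simp at h
  | a :: b :: c :: d :: rest, L2, h => by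
      simp only [List.length_cons] at h
      simp only [List.cons_append, pvPass]
      rw [pvPass_append rest L2 (by omega)]

theorem pvPass_length_quarter : ∀ (n : Nat) (L : List Int), L.length = 4 * n → (pvPass L).length = n
  | n, [], h => by simp only [List.length_nil] at h; simp [pvPass]; omega
  | n, [a], h => by simp at h; omega
  | n, [a, b], h => by simp at h; omega
  | n, [a, b, c], h => by simp at h; omega
  | n, a :: b :: c :: d :: rest, h => by
      simp only [List.length_cons] at h
      simp only [pvPass, List.length_cons]
      rw [pvPass_length_quarter (n - 1) rest (by omega)]
      omega

theorem pvReduce_quad : ∀ (m : Nat) (L1 L2 L3 L4 : List Int) (r1 r2 r3 r4 : Int),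
    L1.length = 4 ^ m → L2.length = 4 ^ m → L3.length = 4 ^ m → L4.length = 4 ^ m →
    pvReduce L1 = [r1] → pvReduce L2 = [r2] → pvReduce L3 = [r3] → pvReduce L4 = [r4] →
    pvReduce (L1 ++ L2 ++ L3 ++ L4) = [pvCombine [r1, r2, r3, r4]]
  | 0, L1, L2, L3, L4, r1, r2, r3, r4, h1, h2, h3, h4, e1, e2, e3, e4 => by
      match L1, L2, L3, L4, h1, h2, h3, h4 with
      | [a1], [a2], [a3], [a4], _, _, _, _ =>
          rw [pvReduce_small _ (by simp)] at e1 e2 e3 e4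
          simp at e1 e2 e3 e4
          subst e1; subst e2; subst e3; subst e4
          rw [pvReduce_step _ (by simp)]
          simp only [List.cons_append, List.nil_append, pvPass]
          exact pvReduce_small _ (by simp)
  | m + 1, L1, L2, L3, L4, r1, r2, r3, r4, h1, h2, h3, h4, e1, e2, e3, e4 => by
      have big : (1:Nat) < 4 ^ (m + 1) := by
        have : (4:Nat) ^ 1 ≤ 4 ^ (m + 1) := Nat.pow_le_pow_right (by omega) (by omega)
        simp at this; omega
      have q4 : (4:Nat) ^ (m + 1) % 4 = 0 := by
        simp [pow_succ, Nat.mul_mod_left]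
      rw [pvReduce_step _ (by omega : ¬ L1.length ≤ 1)] at e1
      rw [pvReduce_step _ (by omega : ¬ L2.length ≤ 1)] at e2
      rw [pvReduce_step _ (by omega : ¬ L3.length ≤ 1)] at e3
      rw [pvReduce_step _ (by omega : ¬ L4.length ≤ 1)] at e4
      have len1 : (pvPass L1).length = 4 ^ m := pvPass_length_quarter _ _ (by rw [h1]; ring)
      have len2 : (pvPass L2).length = 4 ^ m := pvPass_length_quarter _ _ (by rw [h2]; ring)
      have len3 : (pvPass L3).length = 4 ^ m := pvPass_length_quarter _ _ (by rw [h3]; ring)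
      have len4 : (pvPass L4).length = 4 ^ m := pvPass_length_quarter _ _ (by rw [h4]; ring)
      have hlen : ¬ (L1 ++ L2 ++ L3 ++ L4).length ≤ 1 := by simp; omega
      rw [pvReduce_step _ hlen]
      rw [pvPass_append _ _ (by simp [h1, h2, h3, q4, Nat.add_mod]),
          pvPass_append _ _ (by simp [h1, h2, q4, Nat.add_mod]),
          pvPass_append _ _ (by rw [h1]; exact q4)]
      exact pvReduce_quad m _ _ _ _ r1 r2 r3 r4 len1 len2 len3 len4 e1 e2 e3 e4

theorem select_seat_unfold_step (seats : List (List Int)) (size x y : Int) (h : ¬ size < 2) :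
    select_seat seats size x y =
      pvCombine [select_seat seats (PySem.Int.floordiv size 2) x y,
                 select_seat seats (PySem.Int.floordiv size 2) (x + PySem.Int.floordiv size 2) y,
                 select_seat seats (PySem.Int.floordiv size 2) x (y + PySem.Int.floordiv size 2),
                 select_seat seats (PySem.Int.floordiv size 2) (x + PySem.Int.floordiv size 2) (y + PySem.Int.floordiv size 2)] := by
  rw [select_seat]
  simp only [h, dite_false, pyRange04, List.foldl_cons, List.foldl_nil, List.nil_append,
    List.cons_append, pvCombine]
  norm_num [PySem.Int.mod, PySem.Int.floordiv, Int.fmod, Int.fdiv]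

theorem pvReduce_leaves (seats : List (List Int)) :
    ∀ (size x y : Int),
      pvReduce (((pvHalves size).foldl pvExpand [(x, y)]).map (fun c => pvAt seats c.1 c.2)) =
        [select_seat seats size x y]
  | size, x, y => by
      by_cases h : size < 2
      · rw [pvHalves, select_seat]
        simp only [h, dite_true, List.foldl_nil, List.map_cons, List.map_nil]
        exact pvReduce_small _ (by simp)
      · have hrec := pvHalf_lt size h
        set hf := PySem.Int.floordiv size 2 with hfdef
        rw [pvHalves]
        simp only [h, dite_false]
        rw [List.foldl_cons, pvExpand_single]
        have split : ([(x, y), (x + hf, y), (x, y + hf), (x + hf, y + hf)] : List (Int × Int)) =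
            [(x, y)] ++ [(x + hf, y)] ++ [(x, y + hf)] ++ [(x + hf, y + hf)] := by simp
        rw [split, foldl_pvExpand_append, foldl_pvExpand_append, foldl_pvExpand_append,
            List.map_append, List.map_append, List.map_append]
        have len : ∀ cx cy : Int,
            (((pvHalves hf).foldl pvExpand [(cx, cy)]).map (fun c => pvAt seats c.1 c.2)).length
              = 4 ^ (pvHalves hf).length := by
          intro cx cy
          rw [List.length_map, foldl_pvExpand_length]; simp
        rw [select_seat_unfold_step seats size x y h, ← hfdef]
        exact pvReduce_quad (pvHalves hf).length _ _ _ _ _ _ _ _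
          (len x y) (len (x + hf) y) (len x (y + hf)) (len (x + hf) (y + hf))
          (pvReduce_leaves seats hf x y) (pvReduce_leaves seats hf (x + hf) y)
          (pvReduce_leaves seats hf x (y + hf)) (pvReduce_leaves seats hf (x + hf) (y + hf))
  termination_by size _ _ => size.toNat
  decreasing_by all_goals exact hrec

theorem alt_eq (seats : List (List Int)) (size x y : Int) :
    select_seat_alt seats size x y = select_seat seats size x y := by
  unfold select_seat_alt
  show PySem.List.pyGetD
      (pvReduce (((pvHalves size).foldl pvExpand [(x, y)]).map (fun c => pvAt seats c.1 c.2))) 0 0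
    = select_seat seats size x y
  rw [pvReduce_leaves]
  simp [PySem.List.pyGetD_zero_cons]

-- ===== VERDICT (by name: the statement is the Claim_ definition above) =====
theorem select_seat_spec : Claim_equal_select_seat := by
  intro seats size x y _ _
  unfold Spec_select_seat
  exact (alt_eq seats size x y).symm
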